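-- pv_equiv track=rewrite | github.com/ZhiYinZhang/study | utils/split_integer.py | split_range
-- ===== SOURCE A (Python) =====
-- def split_integer(total,partition):
--     """
--     将一个数均分
--     :param total: 需要切分的数
--     :param partition: 分区
--     :return:  每个分区的间隔
--     """
--     assert partition>0
--     quotient = int(total/partition)
--     remainder = total%partition
--     if remainder >0:
--         return [quotient]*(partition-remainder)+[quotient+1]*remainder
--     if remainder <0:
--         return [quotient-1]*(-remainder)+[quotient]*(partition+remainder)
--     return [quotient]*partition
--
-- def split_range(total,partition):
--     """
--     将一个数分成相等的数据间隔
--     :param total: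
--     :param partition:
--     """
--     ranges = []
--     if total>1*1024:
--         intervals = split_integer(total,partition)
--         x = 0
--         y = -1
--         i = 0
--
--         for interval in intervals:
--             x = y+1
--             y = x + (interval - 1)
--
--             i += 1
--             if i == len(intervals):
--                 if y != total:
--                     y = total
--
--             ranges.append((x, y))
--     else:
--        ranges.append((0,total))
--     return ranges
-- ===== SOURCE B (Python) =====
-- def split_range(total, partition):
--     if total <= 1024:
--         return [(0, total)]
--     q, r = divmod(total, partition)
--     k = partition - r
--
--     def bound(i):
--         return i * q + max(0, i - k)
--
--     return [(bound(i), bound(i + 1) - 1 if i < partition - 1 else total)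
--             for i in range(partition)]
-- ===== Notes on version B (the rewrite author's own statement) =====
-- stated objective: alternative
-- what changed: Replaces A's split_integer interval list plus the running x/y accumulator loop by a single comprehension over range(partition) that computes each range's endpoints from a closed-form boundary formula i*q + max(0, i-k) with q, r = divmod(total, partition).
-- outside the precondition, e.g. on split_range(2000, -1): A raises AssertionError, B returns []
import Mathlib
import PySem

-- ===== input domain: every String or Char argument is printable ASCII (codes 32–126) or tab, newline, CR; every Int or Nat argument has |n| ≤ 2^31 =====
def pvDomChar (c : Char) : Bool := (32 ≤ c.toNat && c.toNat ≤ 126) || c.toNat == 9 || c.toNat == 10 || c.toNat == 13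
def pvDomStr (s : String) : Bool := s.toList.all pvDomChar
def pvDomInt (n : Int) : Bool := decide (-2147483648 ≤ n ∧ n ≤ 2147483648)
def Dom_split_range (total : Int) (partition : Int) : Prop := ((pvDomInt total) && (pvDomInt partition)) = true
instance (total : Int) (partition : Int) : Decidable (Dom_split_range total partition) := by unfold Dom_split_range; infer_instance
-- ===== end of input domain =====

-- B replaces A's interval list and the running x/y accumulator by a closed-form
-- boundary formula mapped over range(partition) (objective: alternative decomposition).


-- ===== PORT A =====
-- split_integer: the 'assert partition > 0' raises AssertionError when partition ≤ 0;
-- split_integer is only reached with total > 1024, and Pre_ excludes that combination.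
-- int(total/partition) is truncation toward zero of float division, exact as PySem.Int.truncdiv on |total|,|partition| ≤ 2^31 < 2^53.
def split_integer (total : Int) (partition : Int) : List Int :=
  let quotient := PySem.Int.truncdiv total partition
  let remainder := PySem.Int.mod total partition
  if remainder > 0 then
    List.replicate (partition - remainder).toNat quotient ++
      List.replicate remainder.toNat (quotient + 1)
  else if remainder < 0 then
    List.replicate (-remainder).toNat (quotient - 1) ++
      List.replicate (partition + remainder).toNat quotient
  else
    List.replicate partition.toNat quotient

-- the for-loop of A: state = (running y, counter i); x is recomputed from y each iteration;
-- n is len(intervals), fixed before the loop.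
def srLoop (n : Nat) (total : Int) : List Int → Int → Nat → List (Int × Int)
  | [], _, _ => []
  | interval :: rest, y, i =>
    let x := y + 1
    let y1 := x + (interval - 1)
    let i1 := i + 1
    let y2 := if i1 = n then (if y1 ≠ total then total else y1) else y1
    (x, y2) :: srLoop n total rest y2 i1

def split_range (total : Int) (partition : Int) : List (Int × Int) :=
  if total > 1 * 1024 then
    let intervals := split_integer total partition
    srLoop intervals.length total intervals (-1) 0
  else
    [(0, total)]

-- ===== PORT B =====
def srBound (q : Int) (k : Int) (i : Int) : Int := i * q + max 0 (i - k)

def split_range_alt (total : Int) (partition : Int) : List (Int × Int) :=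
  if total ≤ 1024 then
    [(0, total)]
  else
    let q := PySem.Int.floordiv total partition
    let r := PySem.Int.mod total partition
    let k := partition - r
    (PySem.List.pyRange 0 partition 1).map
      (fun i => (srBound q k i, if i < partition - 1 then srBound q k (i + 1) - 1 else total))

-- ===== PRECONDITION & SPEC =====
-- Pre_ excludes total > 1024 with partition ≤ 0, where A raises AssertionError (assert partition>0).
def Pre_split_range (total : Int) (partition : Int) : Prop := total ≤ 1024 ∨ 0 < partition
instance (total : Int) (partition : Int) : Decidable (Pre_split_range total partition) := by unfold Pre_split_range; infer_instance
def pvWitness_split_range : Int × Int := (2000, 3)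

def Spec_split_range (total : Int) (partition : Int) (out : List (Int × Int)) : Prop := out = split_range_alt total partition
instance (total : Int) (partition : Int) (out : List (Int × Int)) : Decidable (Spec_split_range total partition out) := by unfold Spec_split_range; infer_instance

-- ===== CLAIM (what is proved, stated in full; the proofs are below) =====
def Claim_equal_split_range : Prop := ∀ (total : Int) (partition : Int), Dom_split_range total partition → Pre_split_range total partition → Spec_split_range total partition (split_range total partition)

-- ===== LEMMAS AND PROOFS =====

-- A's loop, closed form: pair j is (y₀+1+Σ_{<j}, prefix-sum end), with the last end forced to total.
theorem srLoop_eq (total : Int) (L : List Int) (y : Int) (i n : Nat)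
    (h : n = i + L.length) (hy : y + L.sum ≠ total) :
    srLoop n total L y i =
      (List.range L.length).map
        (fun j => (y + 1 + (L.take j).sum,
                   if j + 1 = L.length then total else y + (L.take (j + 1)).sum)) := by
  induction L generalizing y i with
  | nil => simp [srLoop]
  | cons a rest ih =>
    match rest, ih with
    | [], _ =>
      have hi1 : i + 1 = n := by simpa using h.symm
      simp [srLoop, hi1, List.range_succ]
    | b :: rest', ih =>
      have hi1 : i + 1 ≠ n := by simp at h; omega
      have hhead : srLoop n total (a :: b :: rest') y i =
          (y + 1, y + a) :: srLoop n total (b :: rest') (y + a) (i + 1) := by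
        simp only [srLoop, hi1, if_false]
        have hv : y + 1 + (a - 1) = y + a := by ring
        rw [hv]
      rw [hhead]
      simp only [List.length_cons]
      rw [List.range_succ_eq_map, List.map_cons, List.map_map]
      rw [ih (y + a) (i + 1) (by simp at h ⊢; omega)
            (by simp at hy ⊢; intro hcon; apply hy; linarith)]
      refine congrArg₂ _ ?_ ?_
      · rw [if_neg (by omega)]; simp
      · simp only [List.length_cons]
        apply List.map_congr_left
        intro j _
        simp only [Function.comp_apply, List.take_succ_cons, List.sum_cons,
          Prod.mk.injEq]
        refine ⟨by ring, ?_⟩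
        split_ifs with h1 h2 <;> first | rfl | omega

-- prefix sums of the interval list are the closed-form boundaries
theorem psum_repl (q : Int) (a b j : Nat) (hj : j ≤ a + b) :
    ((List.replicate a q ++ List.replicate b (q + 1)).take j).sum
      = (j : Int) * q + max 0 ((j : Int) - (a : Int)) := by
  rw [List.take_append, List.sum_append, List.take_replicate, List.take_replicate,
    List.length_replicate, List.sum_replicate, List.sum_replicate,
    nsmul_eq_mul, nsmul_eq_mul]
  by_cases hja : j ≤ a
  · have h1 : min j a = j := by omega
    have h2 : j - a = 0 := by omega
    have h3 : max 0 ((j : Int) - (a : Int)) = 0 := by omega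
    rw [h1, h2, h3]; simp
  · have h1 : min j a = a := by omega
    have h2 : min (j - a) b = j - a := by omega
    have h3 : max 0 ((j : Int) - (a : Int)) = (j : Int) - (a : Int) := by omega
    rw [h1, h2, h3, Nat.cast_sub (by omega : a ≤ j)]; ring

theorem split_integer_eq (total partition q r : Int)
    (hq : PySem.Int.truncdiv total partition = q)
    (hr : PySem.Int.mod total partition = r) (hr0 : 0 ≤ r) :
    split_integer total partition
      = List.replicate (partition - r).toNat q ++ List.replicate r.toNat (q + 1) := by
  simp only [split_integer, hq, hr]
  by_cases hrpos : r > 0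
  · rw [if_pos hrpos]
  · have h0 : r = 0 := by omega
    subst h0; simp

theorem split_range_spec_aux (total partition : Int)
    (hbig : total > 1024) (hp : 0 < partition) :
    split_range total partition = split_range_alt total partition := by
  obtain ⟨q, hqdef⟩ : ∃ q, PySem.Int.floordiv total partition = q := ⟨_, rfl⟩
  obtain ⟨r, hrdef⟩ : ∃ r, PySem.Int.mod total partition = r := ⟨_, rfl⟩
  have hq : PySem.Int.truncdiv total partition = q := by
    rw [← hqdef, PySem.Int.floordiv_eq_ediv_of_pos hp]
    exact Int.tdiv_eq_ediv_of_nonneg (by omega)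
  have hr0 : 0 ≤ r := hrdef ▸ PySem.Int.mod_nonneg total hp
  have hrlt : r < partition := hrdef ▸ PySem.Int.mod_lt total hp
  have htot : q * partition + r = total := by
    rw [← hqdef, ← hrdef]; exact PySem.Int.floordiv_mul_add_mod total partition
  have hint := split_integer_eq total partition q r hq hrdef hr0
  obtain ⟨a, hadef⟩ : ∃ a, (partition - r).toNat = a := ⟨_, rfl⟩
  obtain ⟨b, hbdef⟩ : ∃ b, r.toNat = b := ⟨_, rfl⟩
  rw [hadef, hbdef] at hint
  have ha' : (a : Int) = partition - r := by omega
  have hb' : (b : Int) = r := by omega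
  have hlen : (List.replicate a q ++ List.replicate b (q + 1)).length = partition.toNat := by
    simp; omega
  have hsum : (List.replicate a q ++ List.replicate b (q + 1)).sum = total := by
    simp [List.sum_replicate, ha', hb']; linarith
  have hA : split_range total partition
      = srLoop (List.replicate a q ++ List.replicate b (q + 1)).length total
          (List.replicate a q ++ List.replicate b (q + 1)) (-1) 0 := by
    unfold split_range
    rw [if_pos (by omega), hint]
  rw [hA, srLoop_eq total _ (-1) 0 _ (by simp) (by rw [hsum]; omega)]
  unfold split_range_alt
  rw [if_neg (by omega), hqdef, hrdef, PySem.List.pyRange_one, List.map_map]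
  simp only [sub_zero, zero_add, hlen]
  apply List.map_congr_left
  intro j hj
  have hjlt : j < partition.toNat := List.mem_range.mp hj
  have hjle : j ≤ a + b := by omega
  have hj1le : j + 1 ≤ a + b := by omega
  have hpsj := psum_repl q a b j hjle
  have hpsj1 := psum_repl q a b (j + 1) hj1le
  simp only [Function.comp_apply, Prod.mk.injEq]
  refine ⟨?_, ?_⟩
  · rw [hpsj, ha']
    simp only [srBound]
    ring
  · have hcond : (j + 1 = partition.toNat) ↔ ¬ ((j : Int) < partition - 1) := by omega
    by_cases hlast : j + 1 = partition.toNat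
    · rw [if_pos hlast, if_neg (hcond.mp hlast)]
    · rw [if_neg hlast, if_pos (by by_contra hh; exact hlast (hcond.mpr hh))]
      rw [hpsj1, ha']
      simp only [srBound]
      push_cast
      ring

-- ===== VERDICT (by name: the statement is the Claim_ definition above) =====
theorem split_range_spec : Claim_equal_split_range := by
  intro total partition _ hpre
  unfold Spec_split_range
  by_cases hbig : total > 1024
  · have hp : 0 < partition := by
      cases hpre with
      | inl h => omega
      | inr h => exact h
    exact split_range_spec_aux total partition hbig hp
  · unfold split_range split_range_alt
    rw [if_neg (by omega), if_pos (by omega)]
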